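-- pv_equiv track=rewrite | github.com/logicshaper19/ekumenme | Ekumen-assistant/app/tools/knowledge_base_compliance/web_compliance_verifier.py | _check_regulatory_updates
-- ===== SOURCE A (Python) =====
-- from typing import Dict, Any, List, Optional
--
-- def _check_regulatory_updates(entities: List[str]) -> Dict[str, Any]:
--     """Check for recent regulatory updates affecting the entities"""
--     updates = {
--         "recent_withdrawals": [],
--         "new_restrictions": [],
--         "updated_limits": [],
--         "emergency_suspensions": []
--     }
--
--     if not entities:
--         return updates
--
--     # Mock recent updates
--     for entity in entities:
--         if not entity:
--             continue
--
--         entity_lower = entity.lower()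
--
--         # Check for withdrawals
--         if "tilt" in entity_lower:
--             updates["recent_withdrawals"].append({
--                 "entity": entity,
--                 "action": "withdrawn",
--                 "date": "2023-12-01",
--                 "reason": "Market withdrawal by manufacturer"
--             })
--
--         # Check for new restrictions
--         if "glyphosate" in entity_lower:
--             updates["new_restrictions"].append({
--                 "entity": entity,
--                 "restriction": "Reduced maximum dosage",
--                 "date": "2024-01-15",
--                 "details": "Maximum dosage reduced to 3.0 L/ha"
--             })
--
--         # Check for updated limits
--         if "epoxiconazole" in entity_lower:
--             updates["updated_limits"].append({
--                 "entity": entity,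
--                 "update": "DAR period extended",
--                 "date": "2024-02-01",
--                 "details": "Pre-harvest delay extended to 42 days for wheat"
--             })
--
--     return updates
-- ===== SOURCE B (Python) =====
-- from typing import Dict, Any, List
--
-- _RULES = [
--     ("recent_withdrawals", "tilt",
--      lambda e: {"entity": e, "action": "withdrawn", "date": "2023-12-01",
--                 "reason": "Market withdrawal by manufacturer"}),
--     ("new_restrictions", "glyphosate",
--      lambda e: {"entity": e, "restriction": "Reduced maximum dosage", "date": "2024-01-15",
--                 "details": "Maximum dosage reduced to 3.0 L/ha"}),
--     ("updated_limits", "epoxiconazole",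
--      lambda e: {"entity": e, "update": "DAR period extended", "date": "2024-02-01",
--                 "details": "Pre-harvest delay extended to 42 days for wheat"}),
-- ]
--
-- def _check_regulatory_updates(entities: List[str]) -> Dict[str, Any]:
--     """Check for recent regulatory updates affecting the entities"""
--     updates = {key: [make(e) for e in entities if e and trigger in e.lower()]
--                for key, trigger, make in _RULES}
--     updates["emergency_suspensions"] = []
--     return updates
-- ===== Notes on version B (the rewrite author's own statement) =====
-- stated objective: idiomatic
-- what changed: Replaces the per-entity loop mutating a pre-built dict with a declarative rules table (trigger, key, template builder) and one per-rule comprehension building each output list directly.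
import Mathlib
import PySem

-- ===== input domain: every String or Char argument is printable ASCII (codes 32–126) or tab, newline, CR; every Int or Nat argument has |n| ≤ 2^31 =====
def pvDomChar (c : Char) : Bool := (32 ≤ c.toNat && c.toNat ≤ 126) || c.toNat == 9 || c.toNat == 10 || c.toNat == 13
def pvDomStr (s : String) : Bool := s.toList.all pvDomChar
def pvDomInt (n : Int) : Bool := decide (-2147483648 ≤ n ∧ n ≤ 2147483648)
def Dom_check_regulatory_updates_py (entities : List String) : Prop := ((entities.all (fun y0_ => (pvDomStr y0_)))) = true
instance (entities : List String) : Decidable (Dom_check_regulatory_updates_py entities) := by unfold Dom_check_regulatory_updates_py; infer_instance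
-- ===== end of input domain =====

-- B replaces A's per-entity loop mutating a dict with a rules table and one per-rule comprehension (idiomatic; same cost).

-- ===== PORT A =====
-- the three appended record templates (dict literals in the Python)
def pvWithdrawal (e : String) : List (String × String) :=
  [("entity", e), ("action", "withdrawn"), ("date", "2023-12-01"),
   ("reason", "Market withdrawal by manufacturer")]

def pvRestriction (e : String) : List (String × String) :=
  [("entity", e), ("restriction", "Reduced maximum dosage"), ("date", "2024-01-15"),
   ("details", "Maximum dosage reduced to 3.0 L/ha")]

def pvLimit (e : String) : List (String × String) :=
  [("entity", e), ("update", "DAR period extended"), ("date", "2024-02-01"),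
   ("details", "Pre-harvest delay extended to 42 days for wheat")]

def pvBody (u : PySem.Dict String (List (List (String × String)))) (entity : String) :
    PySem.Dict String (List (List (String × String))) :=
  if entity = "" then u
  else
    let el := PySem.Str.lower entity
    let u := if PySem.Str.isIn "tilt" el then
               u.modify "recent_withdrawals" [] (· ++ [pvWithdrawal entity]) else u
    let u := if PySem.Str.isIn "glyphosate" el then
               u.modify "new_restrictions" [] (· ++ [pvRestriction entity]) else u
    let u := if PySem.Str.isIn "epoxiconazole" el then
               u.modify "updated_limits" [] (· ++ [pvLimit entity]) else u
    u

def check_regulatory_updates_py (entities : List String) : List (String × List (List (String × String))) :=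
  let updates : PySem.Dict String (List (List (String × String))) :=
    PySem.Dict.ofList [("recent_withdrawals", []), ("new_restrictions", []),
                       ("updated_limits", []), ("emergency_suspensions", [])]
  if entities = [] then updates.items
  else
    (entities.foldl pvBody updates).items

-- ===== PORT B =====
-- the rules table: (result key, trigger substring, template builder)
def pvRules : List (String × String × (String → List (String × String))) :=
  [("recent_withdrawals", "tilt", pvWithdrawal),
   ("new_restrictions", "glyphosate", pvRestriction),
   ("updated_limits", "epoxiconazole", pvLimit)]

def check_regulatory_updates_py_alt (entities : List String) : List (String × List (List (String × String))) :=
  (pvRules.map (fun r =>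
      (r.1, (entities.filter (fun e => e ≠ "" && PySem.Str.isIn r.2.1 (PySem.Str.lower e))).map r.2.2)))
  ++ [("emergency_suspensions", [])]

-- ===== PRECONDITION & SPEC =====
def Spec_check_regulatory_updates_py (entities : List String) (out : List (String × List (List (String × String)))) : Prop := out = check_regulatory_updates_py_alt entities
instance (entities : List String) (out : List (String × List (List (String × String)))) : Decidable (Spec_check_regulatory_updates_py entities out) := by unfold Spec_check_regulatory_updates_py; infer_instance

-- ===== CLAIM (what is proved, stated in full; the proofs are below) =====
def Claim_equal_check_regulatory_updates_py : Prop := ∀ (entities : List String), Dom_check_regulatory_updates_py entities → Spec_check_regulatory_updates_py entities (check_regulatory_updates_py entities)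

-- ===== LEMMAS AND PROOFS =====

-- the per-rule comprehension of B over one rule
def pvPick (trig : String) (f : String → List (String × String)) (es : List String) : List (List (String × String)) :=
  (es.filter (fun e => e ≠ "" && PySem.Str.isIn trig (PySem.Str.lower e))).map f

-- one step of A's loop on the four-key dict literal
theorem pvBody_eq (e : String) (a b c d : List (List (String × String))) :
    pvBody (PySem.Dict.mk [("recent_withdrawals", a), ("new_restrictions", b),
                           ("updated_limits", c), ("emergency_suspensions", d)]) e
    = PySem.Dict.mk
        [("recent_withdrawals", a ++ if e ≠ "" ∧ PySem.Str.isIn "tilt" (PySem.Str.lower e) then [pvWithdrawal e] else []),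
         ("new_restrictions", b ++ if e ≠ "" ∧ PySem.Str.isIn "glyphosate" (PySem.Str.lower e) then [pvRestriction e] else []),
         ("updated_limits", c ++ if e ≠ "" ∧ PySem.Str.isIn "epoxiconazole" (PySem.Str.lower e) then [pvLimit e] else []),
         ("emergency_suspensions", d)] := by
  by_cases he : e = ""
  · simp [pvBody, he]
  · by_cases h1 : PySem.Str.isIn "tilt" (PySem.Str.lower e) = true <;>
      by_cases h2 : PySem.Str.isIn "glyphosate" (PySem.Str.lower e) = true <;>
        by_cases h3 : PySem.Str.isIn "epoxiconazole" (PySem.Str.lower e) = true <;>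
          simp only [pvBody, if_neg he, h1, h2, h3, if_true, if_false, Bool.false_eq_true,
                     PySem.Dict.modify, PySem.Dict.insert] <;>
            simp [he, PySem.Dict.getD, PySem.Dict.get?]

-- loop invariant: A's fold on the four-key dict literal appends exactly B's per-rule lists
theorem pvFold_inv (es : List String) (a b c d : List (List (String × String))) :
    es.foldl pvBody
      (PySem.Dict.mk [("recent_withdrawals", a), ("new_restrictions", b),
                      ("updated_limits", c), ("emergency_suspensions", d)])
    = PySem.Dict.mk [("recent_withdrawals", a ++ pvPick "tilt" pvWithdrawal es),
                     ("new_restrictions", b ++ pvPick "glyphosate" pvRestriction es),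
                     ("updated_limits", c ++ pvPick "epoxiconazole" pvLimit es),
                     ("emergency_suspensions", d)] := by
  induction es generalizing a b c d with
  | nil => simp [pvPick]
  | cons e es ih =>
    rw [List.foldl_cons, pvBody_eq, ih]
    simp [pvPick, List.filter_cons, List.append_assoc]
    refine ⟨?_, ?_, ?_⟩ <;> by_cases he : e = "" <;> simp [he] <;>
      split_ifs <;> simp

-- ===== VERDICT (by name: the statement is the Claim_ definition above) =====
theorem check_regulatory_updates_py_spec : Claim_equal_check_regulatory_updates_py := by
  intro entities _
  show check_regulatory_updates_py entities = check_regulatory_updates_py_alt entities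
  unfold check_regulatory_updates_py check_regulatory_updates_py_alt
  by_cases h : entities = []
  · subst h; rfl
  · simp only [if_neg h]
    rw [show (PySem.Dict.ofList [("recent_withdrawals", ([] : List (List (String × String)))), ("new_restrictions", []), ("updated_limits", []), ("emergency_suspensions", [])]) = PySem.Dict.mk [("recent_withdrawals", []), ("new_restrictions", []), ("updated_limits", []), ("emergency_suspensions", [])] from rfl,
       pvFold_inv]
    simp [pvRules, pvPick]
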